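-- pv_equiv track=rewrite | github.com/miliar/Code_Jam_Webscraper | solutions_python/Problem_96/1459.py | getit
-- ===== SOURCE A (Python) =====
-- def getit(alist):
--     res =0
--     s = int(alist[1])
--     p = int(alist[2])
--     for key in alist[3:]:
--         if (int(key) == 3*p-3 or int(key)== 3*p-4) and s>0 and int(key)>p:
--             res +=1
--             s -=1
--         elif int(key) >= 3*p-2:
--             res +=1
--     return res
-- ===== SOURCE B (Python) =====
-- def getit(alist):
--     s = int(alist[1])
--     p = int(alist[2])
--     vals = [int(k) for k in alist[3:]]
--     hi = sum(1 for v in vals if v >= 3 * p - 2)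
--     elig = sum(1 for v in vals if v in (3 * p - 3, 3 * p - 4) and v > p)
--     return hi + min(max(s, 0), elig)
-- ===== Notes on version B (the rewrite author's own statement) =====
-- stated objective: simpler
-- what changed: Replaces the stateful loop that decrements s per matching key by two independent tallies (hi = keys >= 3p-2, elig = keys in {3p-3,3p-4} above p) combined with min(max(s,0), elig), which is order-independent and equivalent.
import Mathlib
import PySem

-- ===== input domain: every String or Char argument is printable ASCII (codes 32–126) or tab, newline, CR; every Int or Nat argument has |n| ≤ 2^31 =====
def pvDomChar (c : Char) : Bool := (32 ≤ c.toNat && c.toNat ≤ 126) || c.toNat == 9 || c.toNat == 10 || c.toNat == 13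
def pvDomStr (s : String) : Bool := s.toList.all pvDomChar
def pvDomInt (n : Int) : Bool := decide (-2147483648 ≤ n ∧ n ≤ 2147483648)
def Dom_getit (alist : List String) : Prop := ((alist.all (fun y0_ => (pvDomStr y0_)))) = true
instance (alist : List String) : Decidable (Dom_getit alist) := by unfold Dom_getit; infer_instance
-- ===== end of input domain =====

-- B replaces A's stateful per-element decrement of s by two independent tallies combined with one min (simpler, order-independent).

-- ===== PORT A =====
-- int(key) for a key admitted by Pre_ (parse always succeeds there); default 0 is never used inside Pre_.
def pvInt (s : String) : Int := (PySem.Int.ofStr? s).getD 0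

-- the loop body of A, over state (res, s)
def getitStep (p : Int) (st : Int × Int) (key : String) : Int × Int :=
  if (pvInt key = 3*p-3 ∨ pvInt key = 3*p-4) ∧ st.2 > 0 ∧ pvInt key > p then
    (st.1 + 1, st.2 - 1)
  else if pvInt key ≥ 3*p-2 then (st.1 + 1, st.2)
  else st

def getit (alist : List String) : Int :=
  let s := pvInt (PySem.List.pyGetD alist 1 "")
  let p := pvInt (PySem.List.pyGetD alist 2 "")
  ((PySem.List.slice alist (some 3) none).foldl (getitStep p) (0, s)).1

-- ===== PORT B =====
def getit_alt (alist : List String) : Int :=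
  let s := pvInt (PySem.List.pyGetD alist 1 "")
  let p := pvInt (PySem.List.pyGetD alist 2 "")
  let vals := (PySem.List.slice alist (some 3) none).map pvInt
  let hi : Int := (vals.filter (fun v => decide (v ≥ 3*p-2))).length
  let elig : Int := (vals.filter (fun v => decide ((v = 3*p-3 ∨ v = 3*p-4) ∧ v > p))).length
  hi + min (max s 0) elig

-- ===== PRECONDITION & SPEC =====
-- Pre_ excludes exactly the inputs where A raises: fewer than 3 elements (IndexError) or an
-- element from index 1 on that int() rejects (ValueError).
def Pre_getit (alist : List String) : Prop :=
  3 ≤ alist.length ∧ ((alist.drop 1).all (fun x => (PySem.Int.ofStr? x).isSome)) = true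
instance (alist : List String) : Decidable (Pre_getit alist) := by unfold Pre_getit; infer_instance
def pvWitness_getit : List String := ["3", "1", "2", "5", "4", "3"]

def Spec_getit (alist : List String) (out : Int) : Prop := out = getit_alt alist
instance (alist : List String) (out : Int) : Decidable (Spec_getit alist out) := by unfold Spec_getit; infer_instance

-- ===== CLAIM (what is proved, stated in full; the proofs are below) =====
def Claim_equal_getit : Prop := ∀ (alist : List String), Dom_getit alist → Pre_getit alist → Spec_getit alist (getit alist)

-- ===== LEMMAS AND PROOFS =====
lemma getit_loop_eq (p : Int) (keys : List String) : ∀ (res s : Int),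
    (keys.foldl (getitStep p) (res, s)).1 =
    res + ((keys.map pvInt).filter (fun v => decide (v ≥ 3*p-2))).length
        + min (max s 0) (((keys.map pvInt).filter (fun v => decide ((v = 3*p-3 ∨ v = 3*p-4) ∧ v > p))).length : Int) := by
  induction keys with
  | nil => intro res s; simp
  | cons k rest ih =>
    intro res s
    simp only [List.foldl_cons, List.map_cons, List.filter_cons, getitStep]
    split_ifs
    all_goals simp only [decide_eq_true_eq] at *
    all_goals try rw [ih]
    all_goals try simp only [List.length_cons, Nat.cast_add, Nat.cast_one]
    all_goals omega

-- ===== VERDICT (by name: the statement is the Claim_ definition above) =====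
theorem getit_spec : Claim_equal_getit := by
  intro alist _ _
  unfold Spec_getit
  simp only [getit, getit_alt]
  rw [getit_loop_eq]
  omega
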